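-- pv_equiv track=rewrite | github.com/tymm/Learning-of-Event-Timelines | feature/preprocessing/tense.py | get_index_of_event
-- ===== SOURCE A (Python) =====
-- def get_index_of_event(chunks, event_text, num_words_as_event_before_event):
--     """Returns the index of the event in the chunks list."""
--
--     # Get the index of the event we are interested in
--     k = 0
--     event_index = 0
--     for i, chunk in enumerate(chunks):
--         if event_text in chunk:
--             if k == num_words_as_event_before_event:
--                 event_index = i
--                 break
--             else:
--                 k += 1
--
--     return event_index
-- ===== SOURCE B (Python) =====
-- def get_index_of_event(chunks, event_text, num_words_as_event_before_event):
--     """Returns the index of the event in the chunks list."""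
--     matches = [i for i, chunk in enumerate(chunks) if event_text in chunk]
--     if 0 <= num_words_as_event_before_event < len(matches):
--         return matches[num_words_as_event_before_event]
--     return 0
-- ===== Notes on version B (the rewrite author's own statement) =====
-- stated objective: simpler
-- what changed: Replaced the counter-plus-early-break scan with building the list of all matching indices once and selecting by position, with out-of-range (including negative) positions falling through to the default 0.
import Mathlib
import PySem

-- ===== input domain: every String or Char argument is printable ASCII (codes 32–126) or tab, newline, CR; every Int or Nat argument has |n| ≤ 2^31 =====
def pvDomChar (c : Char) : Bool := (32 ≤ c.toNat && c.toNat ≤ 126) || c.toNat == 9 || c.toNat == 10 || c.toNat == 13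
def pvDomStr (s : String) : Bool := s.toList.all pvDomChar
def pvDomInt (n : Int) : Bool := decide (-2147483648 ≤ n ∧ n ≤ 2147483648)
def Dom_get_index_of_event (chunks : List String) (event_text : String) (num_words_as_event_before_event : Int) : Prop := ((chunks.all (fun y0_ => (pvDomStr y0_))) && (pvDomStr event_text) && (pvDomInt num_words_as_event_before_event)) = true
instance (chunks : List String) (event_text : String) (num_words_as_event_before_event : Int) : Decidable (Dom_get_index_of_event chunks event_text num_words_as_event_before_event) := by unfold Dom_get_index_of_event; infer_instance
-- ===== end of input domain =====

-- B builds the full list of matching indices once and selects by position (out-of-range/negative → 0),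
-- replacing A's counter-plus-early-break scan; objective: simpler.


-- ===== PORT A =====
-- A's loop: k counts matching chunks seen, breaks returning i when k == target; else returns event_index = 0.
def pvLoopA (event_text : String) (target : Int) : List String → Int → Int → Int
  | [], _, _ => 0
  | chunk :: rest, k, i =>
    if PySem.Str.isIn event_text chunk then
      (if k = target then i else pvLoopA event_text target rest (k + 1) (i + 1))
    else
      pvLoopA event_text target rest k (i + 1)

def get_index_of_event (chunks : List String) (event_text : String) (num_words_as_event_before_event : Int) : Int :=
  pvLoopA event_text num_words_as_event_before_event chunks 0 0

-- ===== PORT B =====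
def get_index_of_event_alt (chunks : List String) (event_text : String) (num_words_as_event_before_event : Int) : Int :=
  let ms := ((PySem.List.enumerate chunks 0).filter (fun p => PySem.Str.isIn event_text p.2)).map (·.1)
  if 0 ≤ num_words_as_event_before_event ∧ num_words_as_event_before_event < (ms.length : Int) then
    PySem.List.pyGetD ms num_words_as_event_before_event 0
  else 0

-- ===== PRECONDITION & SPEC =====
def Spec_get_index_of_event (chunks : List String) (event_text : String) (num_words_as_event_before_event : Int) (out : Int) : Prop := out = get_index_of_event_alt chunks event_text num_words_as_event_before_event
instance (chunks : List String) (event_text : String) (num_words_as_event_before_event : Int) (out : Int) : Decidable (Spec_get_index_of_event chunks event_text num_words_as_event_before_event out) := by unfold Spec_get_index_of_event; infer_instance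

-- ===== CLAIM (what is proved, stated in full; the proofs are below) =====
def Claim_equal_get_index_of_event : Prop := ∀ (chunks : List String) (event_text : String) (num_words_as_event_before_event : Int), Dom_get_index_of_event chunks event_text num_words_as_event_before_event → Spec_get_index_of_event chunks event_text num_words_as_event_before_event (get_index_of_event chunks event_text num_words_as_event_before_event)

-- ===== LEMMAS AND PROOFS =====
-- the matching-index list of B, with the enumeration starting at offset i
def pvMatches (event_text : String) (chunks : List String) (i : Int) : List Int :=
  ((PySem.List.enumerate chunks i).filter (fun p => PySem.Str.isIn event_text p.2)).map (·.1)

theorem pvMatches_nil (event_text : String) (i : Int) : pvMatches event_text [] i = [] := by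
  simp [pvMatches, PySem.List.enumerate_nil]

theorem pvMatches_cons (event_text c : String) (rest : List String) (i : Int) :
    pvMatches event_text (c :: rest) i =
      if PySem.Str.isIn event_text c then i :: pvMatches event_text rest (i + 1)
      else pvMatches event_text rest (i + 1) := by
  simp [pvMatches, PySem.List.enumerate_cons, List.filter_cons]
  split_ifs <;> simp

theorem pvLoopA_eq (event_text : String) (n : Int) (chunks : List String) :
    ∀ (k i : Int), 0 ≤ k →
      pvLoopA event_text n chunks k i =
        (if 0 ≤ n - k ∧ n - k < ((pvMatches event_text chunks i).length : Int)
         then PySem.List.pyGetD (pvMatches event_text chunks i) (n - k) 0 else 0) := by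
  induction chunks with
  | nil =>
    intro k i hk
    simp [pvLoopA, pvMatches_nil]
  | cons c rest ih =>
    intro k i hk
    rw [pvLoopA, pvMatches_cons]
    by_cases hc : PySem.Str.isIn event_text c
    · simp only [hc, if_true]
      by_cases hkn : k = n
      · subst hkn
        rw [if_pos rfl,
            if_pos (show (0:Int) ≤ k - k ∧ k - k < (((i :: pvMatches event_text rest (i+1)).length : Nat) : Int) by
              simp only [List.length_cons]; omega)]
        have h0 : k - k = (0:Int) := by omega
        rw [h0, PySem.List.pyGetD_zero_cons]
      · rw [if_neg hkn, ih (k+1) (i+1) (by omega)]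
        by_cases hlt : 0 ≤ n - (k+1) ∧ n - (k+1) < ((pvMatches event_text rest (i+1)).length : Int)
        · rw [if_pos hlt,
              if_pos (show (0:Int) ≤ n - k ∧ n - k < (((i :: pvMatches event_text rest (i+1)).length : Nat) : Int) by
                simp only [List.length_cons]; omega)]
          have e1 := PySem.List.pyGetD_eq_getElem (xs := pvMatches event_text rest (i+1)) (d := (0:Int)) hlt.1 hlt.2
          have e2 := PySem.List.pyGetD_eq_getElem (xs := i :: pvMatches event_text rest (i+1)) (d := (0:Int))
            (show (0:Int) ≤ n - k by omega)
            (show n - k < (((i :: pvMatches event_text rest (i+1)).length : Nat) : Int) by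
              simp only [List.length_cons]; omega)
          rw [e1, e2]
          have htn : (n - k).toNat = (n - (k+1)).toNat + 1 := by omega
          simp [htn]
        · rw [if_neg hlt,
              if_neg (show ¬ ((0:Int) ≤ n - k ∧ n - k < (((i :: pvMatches event_text rest (i+1)).length : Nat) : Int)) by
                simp only [List.length_cons]; omega)]
    · simp only [hc]
      exact ih k (i+1) hk

-- ===== VERDICT (by name: the statement is the Claim_ definition above) =====
theorem get_index_of_event_spec : Claim_equal_get_index_of_event := by
  intro chunks event_text n _
  unfold Spec_get_index_of_event get_index_of_event get_index_of_event_alt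
  rw [pvLoopA_eq event_text n chunks 0 0 (le_refl 0)]
  simp [pvMatches]
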